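-- pv_equiv track=rewrite | github.com/md-nayeem-khan/content-processing-tool | markdown-content-processor/section_processor.py | _wrap_list_items
-- ===== SOURCE A (Python) =====
-- def _wrap_list_items(text: str, env_type: str = 'itemize') -> str:
--     """Wrap consecutive \\item commands in list environment"""
--     lines = text.split('\n')
--     result = []
--     in_list = False
--
--     for line in lines:
--         if line.strip().startswith('\\item'):
--             if not in_list:
--                 result.append(f'\\begin{{{env_type}}}')
--                 in_list = True
--             result.append(line)
--         else:
--             if in_list:
--                 result.append(f'\\end{{{env_type}}}')
--                 in_list = False
--             result.append(line)
--
--     if in_list: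
--         result.append(f'\\end{{{env_type}}}')
--
--     return '\n'.join(result)
-- ===== SOURCE B (Python) =====
-- def _wrap_list_items(text: str, env_type: str = 'itemize') -> str:
--     """Wrap consecutive \\item commands in list environment (run-grouping version)."""
--     lines = text.split('\n')
--     out = []
--     i = 0
--     n = len(lines)
--     while i < n:
--         is_item = lines[i].strip().startswith('\\item')
--         j = i + 1
--         while j < n and lines[j].strip().startswith('\\item') == is_item:
--             j += 1
--         if is_item:
--             out.append(f'\\begin{{{env_type}}}')
--             out.extend(lines[i:j])
--             out.append(f'\\end{{{env_type}}}')
--         else: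
--             out.extend(lines[i:j])
--         i = j
--     return '\n'.join(out)
-- ===== Notes on version B (the rewrite author's own statement) =====
-- stated objective: alternative
-- what changed: Replaces the per-line in_list flag machine with explicit grouping of the lines into maximal runs of equal item/non-item key, emitting begin/end around each whole item run at once; no state flag and no trailing flush.
import Mathlib
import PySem

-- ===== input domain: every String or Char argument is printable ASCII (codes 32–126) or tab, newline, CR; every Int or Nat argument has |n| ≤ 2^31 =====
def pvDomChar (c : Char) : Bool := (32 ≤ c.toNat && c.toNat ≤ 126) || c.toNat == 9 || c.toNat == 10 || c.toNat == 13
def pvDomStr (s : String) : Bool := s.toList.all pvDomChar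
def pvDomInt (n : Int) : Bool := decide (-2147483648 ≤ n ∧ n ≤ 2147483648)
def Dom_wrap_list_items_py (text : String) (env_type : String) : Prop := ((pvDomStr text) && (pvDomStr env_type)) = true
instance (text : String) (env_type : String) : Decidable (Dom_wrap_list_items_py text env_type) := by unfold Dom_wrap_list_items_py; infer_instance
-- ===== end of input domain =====

-- B replaces A's per-line in_list flag with explicit grouping into maximal runs (alternative decomposition, same cost).

-- ===== PORT A =====
-- line.strip().startswith('\item') — the test both Pythons apply to a line
def pvItemKey (l : List Char) : Bool :=
  PySem.Chars.startswith (PySem.Chars.strip l) "\\item".toList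

def pvBeginTag (env : List Char) : List Char := "\\begin{".toList ++ env ++ ['}']
def pvEndTag (env : List Char) : List Char := "\\end{".toList ++ env ++ ['}']

-- A's for-loop over lines carrying the in_list flag; the [] cases are the final flush
def wlLoopA (env : List Char) : Bool → List (List Char) → List (List Char)
  | true, [] => [pvEndTag env]
  | false, [] => []
  | inList, l :: ls =>
    if pvItemKey l then
      (if inList then [] else [pvBeginTag env]) ++ l :: wlLoopA env true ls
    else
      (if inList then [pvEndTag env] else []) ++ l :: wlLoopA env false ls

def wrap_list_items_py (text : String) (env_type : String) : String :=
  String.mk (PySem.Chars.join ['\n']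
    (wlLoopA env_type.toList false (PySem.Chars.splitOn text.toList ['\n'])))

-- ===== PORT B =====
-- B's outer while loop: take the maximal run of lines with the same key, wrap it if it is an item run
def wlRunsB (env : List Char) : List (List Char) → List (List Char)
  | [] => []
  | l :: ls =>
    let k := pvItemKey l
    let run := ls.takeWhile (fun x => pvItemKey x == k)
    let rest := ls.dropWhile (fun x => pvItemKey x == k)
    (if k then pvBeginTag env :: (l :: run) ++ [pvEndTag env] else l :: run) ++ wlRunsB env rest
termination_by ls => ls.length
decreasing_by
  exact Nat.lt_succ_of_le (List.length_dropWhile_le _ _)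

def wrap_list_items_py_alt (text : String) (env_type : String) : String :=
  String.mk (PySem.Chars.join ['\n']
    (wlRunsB env_type.toList (PySem.Chars.splitOn text.toList ['\n'])))

-- ===== PRECONDITION & SPEC =====
def Spec_wrap_list_items_py (text : String) (env_type : String) (out : String) : Prop := out = wrap_list_items_py_alt text env_type
instance (text : String) (env_type : String) (out : String) : Decidable (Spec_wrap_list_items_py text env_type out) := by unfold Spec_wrap_list_items_py; infer_instance

-- ===== CLAIM (what is proved, stated in full; the proofs are below) =====
def Claim_equal_wrap_list_items_py : Prop := ∀ (text : String) (env_type : String), Dom_wrap_list_items_py text env_type → Spec_wrap_list_items_py text env_type (wrap_list_items_py text env_type)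

-- ===== LEMMAS AND PROOFS =====

-- A's flag-carrying loop equals: the current run (continued if the flag is set), the closing tag if inside, then B on the rest
theorem wlLoopA_eq (env : List Char) (ls : List (List Char)) : ∀ b : Bool,
    wlLoopA env b ls =
      ls.takeWhile (fun x => pvItemKey x == b) ++ (if b then [pvEndTag env] else []) ++
        wlRunsB env (ls.dropWhile (fun x => pvItemKey x == b)) := by
  induction ls with
  | nil => intro b; cases b <;> simp [wlLoopA, wlRunsB]
  | cons l ls ih =>
    intro b
    cases b <;> cases hk : pvItemKey l <;>
      simp [wlLoopA, wlRunsB, hk, ih]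

theorem wlLoopA_false_eq (env : List Char) (ls : List (List Char)) :
    wlLoopA env false ls = wlRunsB env ls := by
  rw [wlLoopA_eq]
  cases ls with
  | nil => simp [wlRunsB]
  | cons l ls =>
    cases hk : pvItemKey l <;>
      simp [wlRunsB, hk]

-- ===== VERDICT (by name: the statement is the Claim_ definition above) =====
theorem wrap_list_items_py_spec : Claim_equal_wrap_list_items_py := by
  intro text env_type _
  unfold Spec_wrap_list_items_py wrap_list_items_py wrap_list_items_py_alt
  rw [wlLoopA_false_eq]
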